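-- pv_equiv track=rewrite | github.com/belamenso/ssmg | ssgm.py | clean_lyrics
-- ===== SOURCE A (Python) =====
-- ALLOWED='abcdefghijklmnopqrstuvwxyz0123456789-'
--
-- def clean_lyrics(dirty_lyrics):
--     lyrics = dirty_lyrics.lower()
--     ret = []
--     current = ''
--     for c in lyrics:
--         if c in ALLOWED:
--             current += c
--         else:
--             if current != '': ret += [current]
--             current = ''
--     if current != '': ret += [current]
--     return ret
-- ===== SOURCE B (Python) =====
-- ALLOWED='abcdefghijklmnopqrstuvwxyz0123456789-'
--
-- def clean_lyrics(dirty_lyrics):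
--     # mask every disallowed character with a space, then let str.split()
--     # extract the maximal runs in one pass
--     return ''.join(c if c in ALLOWED else ' ' for c in dirty_lyrics.lower()).split()
-- ===== Notes on version B (the rewrite author's own statement) =====
-- stated objective: idiomatic
-- what changed: B replaces A's explicit per-character loop with current/ret accumulators by a one-liner that masks every disallowed character with a space and lets str.split() extract the maximal allowed-character runs.
import Mathlib
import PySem

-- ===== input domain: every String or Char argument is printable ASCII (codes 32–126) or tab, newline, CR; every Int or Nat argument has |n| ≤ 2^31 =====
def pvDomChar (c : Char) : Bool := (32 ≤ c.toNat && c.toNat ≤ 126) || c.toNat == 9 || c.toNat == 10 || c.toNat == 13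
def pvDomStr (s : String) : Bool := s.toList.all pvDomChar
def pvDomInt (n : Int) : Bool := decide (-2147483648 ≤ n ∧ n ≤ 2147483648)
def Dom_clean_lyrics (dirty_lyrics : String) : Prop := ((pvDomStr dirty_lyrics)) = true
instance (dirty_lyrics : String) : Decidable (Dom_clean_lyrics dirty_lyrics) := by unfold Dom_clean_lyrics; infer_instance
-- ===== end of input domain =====

-- B masks disallowed characters with a space and splits; same return value, more idiomatic.

def pvAllowed : List Char := "abcdefghijklmnopqrstuvwxyz0123456789-".toList

-- ===== PORT A =====
-- one step of A's for-loop over (ret, current)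
def pvStepA (st : List (List Char) × List Char) (c : Char) : List (List Char) × List Char :=
  if c ∈ pvAllowed then (st.1, st.2 ++ [c])
  else if st.2 ≠ [] then (st.1 ++ [st.2], []) else (st.1, [])

-- the trailing 'if current != ...: ret += [current]'
def pvFlushA (st : List (List Char) × List Char) : List (List Char) :=
  if st.2 ≠ [] then st.1 ++ [st.2] else st.1

def clean_lyrics (dirty_lyrics : String) : List String :=
  let lyrics := PySem.Chars.lower dirty_lyrics.toList
  (pvFlushA (lyrics.foldl pvStepA ([], []))).map String.mk

-- ===== PORT B =====
def pvMask (c : Char) : Char := if c ∈ pvAllowed then c else ' '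

def clean_lyrics_alt (dirty_lyrics : String) : List String :=
  (PySem.Chars.split₀ ((PySem.Chars.lower dirty_lyrics.toList).map pvMask)).map String.mk

-- ===== PRECONDITION & SPEC =====
def Spec_clean_lyrics (dirty_lyrics : String) (out : List String) : Prop := out = clean_lyrics_alt dirty_lyrics
instance (dirty_lyrics : String) (out : List String) : Decidable (Spec_clean_lyrics dirty_lyrics out) := by unfold Spec_clean_lyrics; infer_instance

-- ===== CLAIM (what is proved, stated in full; the proofs are below) =====
def Claim_equal_clean_lyrics : Prop := ∀ (dirty_lyrics : String), Dom_clean_lyrics dirty_lyrics → Spec_clean_lyrics dirty_lyrics (clean_lyrics dirty_lyrics)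

-- ===== LEMMAS AND PROOFS =====

lemma pvAllowed_not_space : ∀ c ∈ pvAllowed, PySem.Chars.isspace c = false := by
  have h : pvAllowed.all (fun c => !PySem.Chars.isspace c) = true := rfl
  intro c hc
  simpa using List.all_eq_true.mp h c hc

lemma pvSpace_isspace : PySem.Chars.isspace ' ' = true := rfl

-- A's accumulated ret is a pure prefix of the final answer
lemma pvFlushA_foldl_prefix (s : List Char) :
    ∀ (ret : List (List Char)) (cur : List Char),
      pvFlushA (s.foldl pvStepA (ret, cur)) = ret ++ pvFlushA (s.foldl pvStepA ([], cur)) := by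
  induction s with
  | nil =>
      intro ret cur
      simp [pvFlushA]
      split <;> simp
  | cons c s ih =>
      intro ret cur
      simp only [List.foldl_cons, pvStepA]
      by_cases hc : c ∈ pvAllowed
      · simp only [if_pos hc]; exact ih ret (cur ++ [c])
      · simp only [if_neg hc]
        by_cases hcur : cur = []
        · subst hcur; simp; exact ih ret []
        · simp only [if_pos hcur]
          simp
          rw [ih (ret ++ [cur]) [], ih [cur] []]
          simp

-- the core invariant: split₀.go on the masked tail = acc so far ++ what A's loop still produces
lemma pvGo_eq (s : List Char) :
    ∀ (cur : List Char) (acc : List (List Char)),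
      PySem.Chars.split₀.go (s.map pvMask) cur.reverse acc
        = acc.reverse ++ pvFlushA (s.foldl pvStepA ([], cur)) := by
  induction s with
  | nil =>
      intro cur acc
      simp [PySem.Chars.split₀.go, pvFlushA]
      by_cases hcur : cur = [] <;> simp [hcur]
  | cons c s ih =>
      intro cur acc
      simp only [List.map_cons, List.foldl_cons, pvStepA]
      by_cases hc : c ∈ pvAllowed
      · have hsp : PySem.Chars.isspace (pvMask c) = false := by
          rw [pvMask, if_pos hc]; exact pvAllowed_not_space c hc
        rw [show PySem.Chars.split₀.go (pvMask c :: s.map pvMask) cur.reverse acc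
              = PySem.Chars.split₀.go (s.map pvMask) (pvMask c :: cur.reverse) acc from by
            simp [PySem.Chars.split₀.go, hsp]]
        rw [pvMask, if_pos hc]
        rw [show c :: cur.reverse = (cur ++ [c]).reverse from by simp]
        rw [ih (cur ++ [c]) acc]
        simp [hc]
      · have hm : pvMask c = ' ' := by rw [pvMask, if_neg hc]
        rw [hm]
        by_cases hcur : cur = []
        · subst hcur
          rw [show PySem.Chars.split₀.go (' ' :: s.map pvMask) ([] : List Char).reverse acc
                = PySem.Chars.split₀.go (s.map pvMask) ([] : List Char).reverse acc from by
              simp [PySem.Chars.split₀.go, pvSpace_isspace]]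
          rw [ih [] acc]
          simp [hc]
        · rw [show PySem.Chars.split₀.go (' ' :: s.map pvMask) cur.reverse acc
                = PySem.Chars.split₀.go (s.map pvMask) ([] : List Char).reverse (cur.reverse.reverse :: acc) from by
              simp [PySem.Chars.split₀.go, pvSpace_isspace, List.isEmpty_iff, hcur]]
          rw [ih [] (cur.reverse.reverse :: acc)]
          simp [hc, hcur]
          rw [pvFlushA_foldl_prefix s [cur] []]
          simp

-- ===== VERDICT (by name: the statement is the Claim_ definition above) =====
theorem clean_lyrics_spec : Claim_equal_clean_lyrics := by
  intro s _
  show _ = _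
  unfold clean_lyrics clean_lyrics_alt
  rw [PySem.Chars.split₀,
      show ([] : List Char) = ([] : List Char).reverse from rfl,
      pvGo_eq (PySem.Chars.lower s.toList) [] []]
  simp
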